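-- pv_equiv track=rewrite | github.com/kszhao552/CS111 | midterm2.py | longest_dna
-- ===== SOURCE A (Python) =====
-- def longest_dna(s):
--     longest = ''
--     current = ''
--     for c in s:
--         if c in 'ACGT':
--             current += c
--             if len(current) > len(longest):
--                 longest = current
--         else:
--             current = ''
--     return longest
-- ===== SOURCE B (Python) =====
-- def longest_dna(s):
--     # tokenize into maximal ACGT runs, then reduce: first run of maximal length
--     runs = []
--     cur = []
--     for c in s:
--         if c in 'ACGT':
--             cur.append(c)
--         else:
--             if cur:
--                 runs.append(''.join(cur))
--             cur = []
--     if cur: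
--         runs.append(''.join(cur))
--     return max(runs, key=len, default='')
-- ===== Notes on version B (the rewrite author's own statement) =====
-- stated objective: alternative
-- what changed: A tracks the running best substring incrementally per character; B first tokenizes the string into its maximal ACGT runs and then reduces with max(key=len, default=''), which keeps the earliest run on ties exactly like A.
import Mathlib
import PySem

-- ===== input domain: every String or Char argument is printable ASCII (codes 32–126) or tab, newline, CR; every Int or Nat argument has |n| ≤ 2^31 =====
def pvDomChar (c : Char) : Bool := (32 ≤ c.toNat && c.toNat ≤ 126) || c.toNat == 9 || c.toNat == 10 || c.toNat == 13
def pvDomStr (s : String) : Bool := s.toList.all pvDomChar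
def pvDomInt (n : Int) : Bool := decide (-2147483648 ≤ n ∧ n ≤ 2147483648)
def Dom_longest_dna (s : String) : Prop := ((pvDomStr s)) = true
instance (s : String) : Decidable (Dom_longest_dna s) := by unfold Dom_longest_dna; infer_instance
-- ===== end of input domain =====

-- B tokenizes the string into maximal ACGT runs and reduces with first-maximal-by-length, instead of A's incremental per-character best tracking.


-- `c in 'ACGT'` for a single character
def isACGT (c : Char) : Bool := c == 'A' || c == 'C' || c == 'G' || c == 'T'

-- ===== PORT A =====
-- state = (longest, current), strings as List Char
def stepA (p : List Char × List Char) (c : Char) : List Char × List Char :=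
  if isACGT c then
    let cur := p.2 ++ [c]
    (if cur.length > p.1.length then cur else p.1, cur)
  else (p.1, [])

def longest_dna (s : String) : String :=
  String.mk (s.toList.foldl stepA ([], [])).1

-- ===== PORT B =====
-- tokenizer state = (completed runs, current run)
def stepB (p : List (List Char) × List Char) (c : Char) : List (List Char) × List Char :=
  if isACGT c then (p.1, p.2 ++ [c])
  else (if p.2.isEmpty then p.1 else p.1 ++ [p.2], [])

-- max(runs, key=len, default='') : first element of maximal length, '' if empty
def pickLonger (best r : List Char) : List Char :=
  if r.length > best.length then r else best

def longest_dna_alt (s : String) : String :=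
  let st := s.toList.foldl stepB ([], [])
  let runs := if st.2.isEmpty then st.1 else st.1 ++ [st.2]
  String.mk (runs.foldl pickLonger [])

-- ===== PRECONDITION & SPEC =====
def Spec_longest_dna (s : String) (out : String) : Prop := out = longest_dna_alt s
instance (s : String) (out : String) : Decidable (Spec_longest_dna s out) := by unfold Spec_longest_dna; infer_instance

-- ===== CLAIM (what is proved, stated in full; the proofs are below) =====
def Claim_equal_longest_dna : Prop := ∀ (s : String), Dom_longest_dna s → Spec_longest_dna s (longest_dna s)

-- ===== LEMMAS AND PROOFS =====

lemma pickLonger_nil (R : List Char) : pickLonger R [] = R := by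
  simp [pickLonger]

lemma foldl_pick_concat (rs : List (List Char)) (r : List Char) :
    (rs ++ [r]).foldl pickLonger [] = pickLonger (rs.foldl pickLonger []) r := by
  simp [List.foldl_append]

-- one step preserves the relation between A's state and B's state
lemma step_rel (runs : List (List Char)) (cur : List Char) (c : Char) :
    stepA (pickLonger (runs.foldl pickLonger []) cur, cur) c
      = (pickLonger ((stepB (runs, cur) c).1.foldl pickLonger []) (stepB (runs, cur) c).2,
         (stepB (runs, cur) c).2) := by
  by_cases h : isACGT c = true
  · simp only [stepA, stepB, h, if_pos, pickLonger, List.length_append,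
      List.length_cons]
    split_ifs <;> first | rfl | omega | (exfalso; omega)
  · simp only [stepA, stepB, h, if_neg, Bool.false_eq_true, not_false_iff, if_false]
    by_cases he : cur.isEmpty
    · have : cur = [] := by simpa [List.isEmpty_iff] using he
      simp [this, pickLonger_nil, he]
    · simp [he, foldl_pick_concat, pickLonger_nil]

-- main invariant: folding A from the related state lands in the related state
lemma key (cs : List Char) : ∀ (runs : List (List Char)) (cur : List Char),
    cs.foldl stepA (pickLonger (runs.foldl pickLonger []) cur, cur)
      = (pickLonger ((cs.foldl stepB (runs, cur)).1.foldl pickLonger [])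
          (cs.foldl stepB (runs, cur)).2,
         (cs.foldl stepB (runs, cur)).2) := by
  induction cs with
  | nil => intro runs cur; simp
  | cons c cs ih =>
      intro runs cur
      have h := step_rel runs cur c
      calc (c :: cs).foldl stepA (pickLonger (runs.foldl pickLonger []) cur, cur)
          = cs.foldl stepA (stepA (pickLonger (runs.foldl pickLonger []) cur, cur) c) := by
            simp [List.foldl_cons]
        _ = cs.foldl stepA (pickLonger ((stepB (runs, cur) c).1.foldl pickLonger [])
              (stepB (runs, cur) c).2, (stepB (runs, cur) c).2) := by rw [h]
        _ = _ := by
            rw [ih (stepB (runs, cur) c).1 (stepB (runs, cur) c).2]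
            simp [List.foldl_cons]

-- ===== VERDICT (by name: the statement is the Claim_ definition above) =====
theorem longest_dna_spec : Claim_equal_longest_dna := by
  intro s _
  show longest_dna s = longest_dna_alt s
  unfold longest_dna longest_dna_alt
  have h := key s.toList [] []
  simp only [List.foldl_nil, pickLonger_nil] at h
  rw [h]
  set st := s.toList.foldl stepB ([], []) with hst
  by_cases he : st.2.isEmpty
  · have : st.2 = [] := by simpa [List.isEmpty_iff] using he
    simp [he, this, pickLonger_nil]
  · simp [he, foldl_pick_concat]
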